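-- pv_equiv track=rewrite | github.com/Roger987/ISE_G1_Exception_Handling | rq1_statistical_analysis.py | _extract_between_prefix_and_results
-- ===== SOURCE A (Python) =====
-- from typing import Dict, Iterable, List, Optional, Tuple
--
-- PREFIX = "vibe_dataset_apps_"
--
-- RESULTS_MARKERS = ["_results-", "_results_"]
--
-- def _extract_between_prefix_and_results(stem: str) -> Tuple[Optional[str], Optional[str], Optional[str]]:
--     if not stem.startswith(PREFIX):
--         return None, None, None
--
--     marker_pos = None
--     marker_used = None
--     for m in RESULTS_MARKERS:
--         pos = stem.find(m, len(PREFIX))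
--         if pos != -1 and (marker_pos is None or pos < marker_pos):
--             marker_pos = pos
--             marker_used = m
--     if marker_pos is None:
--         return None, None, None
--
--     mid = stem[len(PREFIX) : marker_pos]
--     query = stem[marker_pos + len(marker_used) :]
--     if not mid or not query:
--         return None, None, None
--     return mid, marker_used, query
-- ===== SOURCE B (Python) =====
-- PREFIX = "vibe_dataset_apps_"
--
--
-- def _extract_between_prefix_and_results(stem):
--     # Single left-to-right scan for the first results-token-plus-separator match,
--     # instead of two separate find() passes whose minimum is kept.
--     if not stem.startswith(PREFIX):
--         return None, None, None
--     n = len(stem)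
--     for i in range(len(PREFIX), n):
--         if stem.startswith("_results", i) and i + 8 < n and stem[i + 8] in "-_":
--             mid = stem[len(PREFIX):i]
--             query = stem[i + 9:]
--             if not mid or not query:
--                 return None, None, None
--             return mid, "_results" + stem[i + 8], query
--     return None, None, None
-- ===== Notes on version B (the rewrite author's own statement) =====
-- stated objective: alternative
-- what changed: Replaces the two separate stem.find passes (one per marker) plus keep-the-minimum bookkeeping with a single left-to-right scan that stops at the first position where the results token is followed by one of the two separator characters.
import Mathlib
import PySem

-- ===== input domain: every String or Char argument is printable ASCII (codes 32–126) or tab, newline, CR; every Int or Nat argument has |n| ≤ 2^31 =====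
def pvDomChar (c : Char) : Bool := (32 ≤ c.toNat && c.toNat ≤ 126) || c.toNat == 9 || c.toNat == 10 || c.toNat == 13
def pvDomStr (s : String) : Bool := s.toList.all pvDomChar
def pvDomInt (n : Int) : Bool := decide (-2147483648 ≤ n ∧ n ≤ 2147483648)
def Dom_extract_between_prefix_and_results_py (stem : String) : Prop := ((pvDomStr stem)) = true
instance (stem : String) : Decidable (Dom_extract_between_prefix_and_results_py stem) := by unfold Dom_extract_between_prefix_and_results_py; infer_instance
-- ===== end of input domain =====

-- B replaces A's two find() passes (minimum position kept) by one left-to-right scan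
-- stopping at the first results-token-plus-separator match (objective: alternative, same cost).

-- ===== PORT A =====
def pvPREFIX : String := "vibe_dataset_apps_"
def pvM1 : String := "_results-"
def pvM2 : String := "_results_"

def extract_between_prefix_and_results_py (stem : String) :
    Option String × Option String × Option String :=
  if PySem.Str.startswith stem pvPREFIX then
    -- marker_pos / marker_used are always assigned together, so the pair is one Option state
    let st := [pvM1, pvM2].foldl
      (fun (st : Option (Int × String)) m =>
        let pos := PySem.Str.findFrom stem m (PySem.Str.len pvPREFIX)
        if pos != -1 && (match st with | none => true | some (mp, _) => decide (pos < mp)) then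
          some (pos, m)
        else st) none
    match st with
    | none => (none, none, none)
    | some (mp, mu) =>
      let mid := PySem.Str.slice stem (some (PySem.Str.len pvPREFIX)) (some mp)
      let query := PySem.Str.slice stem (some (mp + PySem.Str.len mu)) none
      if mid = "" ∨ query = "" then (none, none, none)
      else (some mid, some mu, some query)
  else (none, none, none)

-- ===== PORT B =====
-- does the results token followed by a separator char occur at the head of the suffix l = stem[i:]?
def pvMatchAt (l : List Char) : Option Char :=
  if "_results".toList <+: l then
    match l[8]? with
    | some c => if c = '-' || c = '_' then some c else none
    | none => none
  else none

-- the `for i in range(len(PREFIX), n)` scan, i the absolute index of the current suffix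
def pvScan : List Char → Nat → Option (Nat × Char)
  | [], _ => none
  | c :: t, i =>
    match pvMatchAt (c :: t) with
    | some sep => some (i, sep)
    | none => pvScan t (i + 1)

def extract_between_prefix_and_results_py_alt (stem : String) :
    Option String × Option String × Option String :=
  let L := stem.toList
  if "vibe_dataset_apps_".toList <+: L then
    match pvScan (L.drop 18) 18 with
    | none => (none, none, none)
    | some (p, sep) =>
      let mid := (L.drop 18).take (p - 18)
      let query := L.drop (p + 9)
      if mid = [] ∨ query = [] then (none, none, none)
      else (some (String.ofList mid),
            some (String.ofList ("_results".toList ++ [sep])),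
            some (String.ofList query))
  else (none, none, none)

-- ===== PRECONDITION & SPEC =====
def Spec_extract_between_prefix_and_results_py (stem : String) (out : Option String × Option String × Option String) : Prop := out = extract_between_prefix_and_results_py_alt stem
instance (stem : String) (out : Option String × Option String × Option String) : Decidable (Spec_extract_between_prefix_and_results_py stem out) := by unfold Spec_extract_between_prefix_and_results_py; infer_instance

-- ===== CLAIM (what is proved, stated in full; the proofs are below) =====
def Claim_equal_extract_between_prefix_and_results_py : Prop := ∀ (stem : String), Dom_extract_between_prefix_and_results_py stem → Spec_extract_between_prefix_and_results_py stem (extract_between_prefix_and_results_py stem)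

-- ===== LEMMAS AND PROOFS =====

lemma pv_prefix_snoc {α : Type} (xs : List α) (c : α) (l : List α) :
    xs ++ [c] <+: l ↔ xs <+: l ∧ l[xs.length]? = some c := by
  constructor
  · rintro ⟨t, rfl⟩
    refine ⟨⟨[c] ++ t, by simp⟩, ?_⟩
    simp
  · rintro ⟨⟨t, rfl⟩, h⟩
    rw [List.getElem?_append_right (le_refl _)] at h
    simp only [Nat.sub_self] at h
    cases t with
    | nil => simp at h
    | cons a t' =>
      simp only [List.getElem?_cons_zero, Option.some.injEq] at h
      subst h
      exact ⟨t', by simp⟩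

lemma pvMatchAt_eq_some (l : List Char) (c : Char) :
    pvMatchAt l = some c ↔ ("_results".toList ++ [c] <+: l) ∧ (c = '-' ∨ c = '_') := by
  have hlen : ("_results".toList).length = 8 := by decide
  constructor
  · intro h
    unfold pvMatchAt at h
    split_ifs at h with hp
    · cases hg : l[8]? with
      | none => simp only [hg] at h; cases h
      | some d =>
        simp only [hg] at h
        split_ifs at h with hdd
        · obtain rfl : d = c := by injection h
          simp only [Bool.or_eq_true, decide_eq_true_eq] at hdd
          refine ⟨(pv_prefix_snoc _ _ _).mpr ⟨hp, ?_⟩, hdd⟩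
          rw [hlen]; exact hg
  · rintro ⟨hp, hc⟩
    obtain ⟨hp', hg⟩ := (pv_prefix_snoc _ _ _).mp hp
    rw [hlen] at hg
    unfold pvMatchAt
    rw [if_pos hp']
    simp only [hg]
    have hdd : (decide (c = '-') || decide (c = '_')) = true := by
      rcases hc with rfl | rfl <;> decide
    simp only [hdd, if_true]

lemma pvM1_toList : pvM1.toList = "_results".toList ++ ['-'] := by decide
lemma pvM2_toList : pvM2.toList = "_results".toList ++ ['_'] := by decide

lemma pvMatchAt_eq_none (l : List Char) :
    pvMatchAt l = none ↔ ¬ (pvM1.toList <+: l) ∧ ¬ (pvM2.toList <+: l) := by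
  constructor
  · intro h
    constructor
    · intro hp
      have := (pvMatchAt_eq_some l '-').mpr ⟨by rw [← pvM1_toList]; exact hp, Or.inl rfl⟩
      rw [h] at this; cases this
    · intro hp
      have := (pvMatchAt_eq_some l '_').mpr ⟨by rw [← pvM2_toList]; exact hp, Or.inr rfl⟩
      rw [h] at this; cases this
  · rintro ⟨h1, h2⟩
    cases hm : pvMatchAt l with
    | none => rfl
    | some c =>
      exfalso
      obtain ⟨hp, hc⟩ := (pvMatchAt_eq_some l c).mp hm
      rcases hc with rfl | rfl
      · exact h1 (by rw [pvM1_toList]; exact hp)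
      · exact h2 (by rw [pvM2_toList]; exact hp)

lemma pvScan_eq_none (l : List Char) (i : Nat)
    (h : ∀ j, pvMatchAt (l.drop j) = none) : pvScan l i = none := by
  induction l generalizing i with
  | nil => rfl
  | cons a t ih =>
    have h0 := h 0
    simp only [List.drop_zero] at h0
    simp only [pvScan, h0]
    exact ih (i + 1) (fun j => by simpa using h (j + 1))

lemma pvScan_eq_some (l : List Char) (i j : Nat) (c : Char)
    (hj : pvMatchAt (l.drop j) = some c)
    (hmin : ∀ j' < j, pvMatchAt (l.drop j') = none) :
    pvScan l i = some (i + j, c) := by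
  induction l generalizing i j with
  | nil =>
    exfalso
    simp only [List.drop_nil] at hj
    have : pvMatchAt ([] : List Char) = none := by decide
    rw [this] at hj; cases hj
  | cons a t ih =>
    cases j with
    | zero =>
      simp only [List.drop_zero] at hj
      simp [pvScan, hj]
    | succ j' =>
      have h0 := hmin 0 (Nat.succ_pos _)
      simp only [List.drop_zero] at h0
      simp only [pvScan, h0]
      have := ih (i + 1) j' (by simpa using hj)
        (fun k hk => by simpa using hmin (k + 1) (Nat.succ_lt_succ hk))
      have heq : i + 1 + j' = i + (j' + 1) := by omega
      rw [this, heq]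

lemma pv_toList_eq_nil_iff (s : String) : s.toList = [] ↔ s = "" := by
  constructor
  · intro h; have := congrArg String.ofList h; rwa [String.ofList_toList] at this
  · intro h; simp [h]

lemma pv_drop_drop (L : List Char) (k : Nat) : (L.drop 18).drop k = L.drop (18 + k) := by
  rw [List.drop_drop]

-- B's scan finds exactly the first matching position
lemma pv_scan_found (L : List Char) (c : Char) (p : Int)
    (hge : ((18 : Nat) : Int) ≤ p)
    (hpref : ("_results".toList ++ [c]) <+: L.drop p.toNat)
    (hc : c = '-' ∨ c = '_')
    (hnone : ∀ i : Nat, 18 ≤ i → i < p.toNat →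
      ¬ pvM1.toList <+: L.drop i ∧ ¬ pvM2.toList <+: L.drop i) :
    pvScan (L.drop 18) 18 = some (p.toNat, c) := by
  have h18p : 18 ≤ p.toNat := by omega
  have hj : pvMatchAt ((L.drop 18).drop (p.toNat - 18)) = some c := by
    rw [pv_drop_drop]
    have h18j : 18 + (p.toNat - 18) = p.toNat := by omega
    rw [h18j]
    exact (pvMatchAt_eq_some _ _).mpr ⟨hpref, hc⟩
  have hmin : ∀ k < p.toNat - 18, pvMatchAt ((L.drop 18).drop k) = none := by
    intro k hk
    rw [pv_drop_drop, pvMatchAt_eq_none]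
    exact hnone (18 + k) (by omega) (by omega)
  have h' : 18 + (p.toNat - 18) = p.toNat := by omega
  have := pvScan_eq_some (L.drop 18) 18 (p.toNat - 18) c hj hmin
  rw [this, h']

-- shared tail: the slicing/empty-check part of both ports agrees at position p
lemma pv_tail (stem : String) (p : Int) (mu : String) (c : Char)
    (h0 : (0 : Int) ≤ p) (hmu : mu.toList = "_results".toList ++ [c]) :
    (if PySem.Str.slice stem (some (PySem.Str.len pvPREFIX)) (some p) = "" ∨
        PySem.Str.slice stem (some (p + PySem.Str.len mu)) none = "" then
       ((none, none, none) : Option String × Option String × Option String)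
     else (some (PySem.Str.slice stem (some (PySem.Str.len pvPREFIX)) (some p)), some mu,
           some (PySem.Str.slice stem (some (p + PySem.Str.len mu)) none)))
    = (if (stem.toList.drop 18).take (p.toNat - 18) = [] ∨ stem.toList.drop (p.toNat + 9) = [] then
         (none, none, none)
       else (some (String.ofList ((stem.toList.drop 18).take (p.toNat - 18))),
             some (String.ofList ("_results".toList ++ [c])),
             some (String.ofList (stem.toList.drop (p.toNat + 9))))) := by
  have hlenP : PySem.Str.len pvPREFIX = ((18 : Nat) : Int) := by decide
  have hlenMu : PySem.Str.len mu = (9 : Int) := by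
    simp [PySem.Str.len_eq, hmu]
  have hmid : (PySem.Str.slice stem (some (PySem.Str.len pvPREFIX)) (some p)).toList
      = (stem.toList.drop 18).take (p.toNat - 18) := by
    rw [hlenP, PySem.Str.toList_slice, PySem.Chars.slice_eq_listSlice,
      PySem.List.slice_toNat _ (by norm_num) h0]
    simp
  have hquery : (PySem.Str.slice stem (some (p + PySem.Str.len mu)) none).toList
      = stem.toList.drop (p.toNat + 9) := by
    rw [hlenMu, PySem.Str.toList_slice, PySem.Chars.slice_eq_listSlice,
      PySem.List.slice_from _ (by omega : (0 : Int) ≤ p + 9)]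
    congr 1
    omega
  have hmide : (PySem.Str.slice stem (some (PySem.Str.len pvPREFIX)) (some p) = "")
      ↔ ((stem.toList.drop 18).take (p.toNat - 18) = []) := by
    rw [← hmid, pv_toList_eq_nil_iff]
  have hqe : (PySem.Str.slice stem (some (p + PySem.Str.len mu)) none = "")
      ↔ (stem.toList.drop (p.toNat + 9) = []) := by
    rw [← hquery, pv_toList_eq_nil_iff]
  by_cases hempty : (stem.toList.drop 18).take (p.toNat - 18) = [] ∨ stem.toList.drop (p.toNat + 9) = []
  · rw [if_pos (by rw [hmide, hqe]; exact hempty), if_pos hempty]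
  · rw [if_neg (by rw [hmide, hqe]; exact hempty), if_neg hempty]
    refine congrArg₂ _ ?_ (congrArg₂ _ ?_ ?_)
    · rw [← hmid, String.ofList_toList]
    · rw [← hmu, String.ofList_toList]
    · rw [← hquery, String.ofList_toList]

lemma pv_no_match_of_findFrom_neg (L : List Char) (m : List Char) (h18 : 18 ≤ L.length)
    (h : PySem.Chars.findFrom L m ((18 : Nat) : Int) = -1) :
    ∀ j : Nat, 18 ≤ j → ¬ m <+: L.drop j := by
  intro j hj hp
  have hnin : ¬ m <:+: L.drop 18 :=
    (PySem.Chars.findFrom_natCast_eq_neg_one_iff L m 18 h18).mp h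
  apply hnin
  rw [← PySem.Chars.isIn_iff_infix]
  apply (PySem.Chars.exists_prefix_drop_iff_isIn m (L.drop 18)).mp
  refine ⟨j - 18, ?_⟩
  have hjj : 18 + (j - 18) = j := by omega
  rw [pv_drop_drop, hjj]
  exact hp

-- ===== VERDICT (by name: the statement is the Claim_ definition above) =====
theorem extract_between_prefix_and_results_py_spec : Claim_equal_extract_between_prefix_and_results_py := by
  intro stem _
  unfold Spec_extract_between_prefix_and_results_py
  unfold extract_between_prefix_and_results_py extract_between_prefix_and_results_py_alt
  by_cases hpre : "vibe_dataset_apps_".toList <+: stem.toList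
  · have hsw : PySem.Str.startswith stem pvPREFIX = true := by
      rw [PySem.Str.startswith_eq]
      exact (PySem.Chars.startswith_iff _ _).mpr hpre
    rw [if_pos hsw, if_pos hpre]
    have h18 : 18 ≤ stem.toList.length := by
      have h := hpre.length_le
      have h' : ("vibe_dataset_apps_".toList).length = 18 := by decide
      omega
    have hlenP : PySem.Str.len pvPREFIX = ((18 : Nat) : Int) := by decide
    have hfind1 : PySem.Str.findFrom stem pvM1 (PySem.Str.len pvPREFIX)
        = PySem.Chars.findFrom stem.toList pvM1.toList ((18 : Nat) : Int) := by
      rw [hlenP, PySem.Str.findFrom_eq]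
    have hfind2 : PySem.Str.findFrom stem pvM2 (PySem.Str.len pvPREFIX)
        = PySem.Chars.findFrom stem.toList pvM2.toList ((18 : Nat) : Int) := by
      rw [hlenP, PySem.Str.findFrom_eq]
    set p1 := PySem.Chars.findFrom stem.toList pvM1.toList ((18 : Nat) : Int) with hp1def
    set p2 := PySem.Chars.findFrom stem.toList pvM2.toList ((18 : Nat) : Int) with hp2def
    by_cases h1 : p1 = -1
    · by_cases h2 : p2 = -1
      · -- no marker anywhere: both return Nones
        have hscan : pvScan (stem.toList.drop 18) 18 = none := by
          apply pvScan_eq_none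
          intro j
          rw [pvMatchAt_eq_none, pv_drop_drop]
          exact ⟨pv_no_match_of_findFrom_neg _ _ h18 h1 (18 + j) (by omega),
                 pv_no_match_of_findFrom_neg _ _ h18 h2 (18 + j) (by omega)⟩
        simp only [List.foldl_cons, List.foldl_nil, hfind1, hfind2, hscan]
        have c1 : (p1 != -1) = false := by simp [h1]
        have c2 : (p2 != -1) = false := by simp [h2]
        simp [c1, c2]
      · -- only "_results_" occurs: st = some (p2, pvM2)
        obtain ⟨hge2, hpref2, hmin2⟩ :=
          PySem.Chars.findFrom_natCast_spec stem.toList pvM2.toList 18 h18 h2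
        have hscan : pvScan (stem.toList.drop 18) 18 = some (p2.toNat, '_') := by
          apply pv_scan_found _ _ _ hge2 (by rw [← pvM2_toList]; exact hpref2) (Or.inr rfl)
          intro i hi hilt
          exact ⟨pv_no_match_of_findFrom_neg _ _ h18 h1 i hi, hmin2 i hi hilt⟩
        simp only [List.foldl_cons, List.foldl_nil, hfind1, hfind2, hscan]
        have c1 : (p1 != -1) = false := by simp [h1]
        have c2 : (p2 != -1) = true := by simp [h2]
        have := pv_tail stem p2 pvM2 '_' (by omega) pvM2_toList
        simpa [c1, c2] using this
    · -- "_results-" occurs at p1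
      obtain ⟨hge1, hpref1, hmin1⟩ :=
        PySem.Chars.findFrom_natCast_spec stem.toList pvM1.toList 18 h18 h1
      by_cases hlt : p2 ≠ -1 ∧ p2 < p1
      · -- "_results_" occurs strictly earlier: st = some (p2, pvM2)
        obtain ⟨h2, hplt⟩ := hlt
        obtain ⟨hge2, hpref2, hmin2⟩ :=
          PySem.Chars.findFrom_natCast_spec stem.toList pvM2.toList 18 h18 h2
        have hscan : pvScan (stem.toList.drop 18) 18 = some (p2.toNat, '_') := by
          apply pv_scan_found _ _ _ hge2 (by rw [← pvM2_toList]; exact hpref2) (Or.inr rfl)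
          intro i hi hilt
          exact ⟨hmin1 i hi (by omega), hmin2 i hi hilt⟩
        simp only [List.foldl_cons, List.foldl_nil, hfind1, hfind2, hscan]
        have c1 : (p1 != -1) = true := by simp [h1]
        have c2 : (p2 != -1) = true := by simp [h2]
        have hplt' : decide (p2 < p1) = true := by simp [hplt]
        have := pv_tail stem p2 pvM2 '_' (by omega) pvM2_toList
        simpa [c1, c2, hplt'] using this
      · -- p1 is the first marker: st = some (p1, pvM1)
        have hscan : pvScan (stem.toList.drop 18) 18 = some (p1.toNat, '-') := by
          apply pv_scan_found _ _ _ hge1 (by rw [← pvM1_toList]; exact hpref1) (Or.inl rfl)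
          intro i hi hilt
          refine ⟨hmin1 i hi hilt, ?_⟩
          by_cases h2 : p2 = -1
          · exact pv_no_match_of_findFrom_neg _ _ h18 h2 i hi
          · have hle : p1 ≤ p2 := by
              rcases not_and_or.mp hlt with hcontra | hnl
              · exact absurd (not_not.mp hcontra) h2
              · omega
            obtain ⟨hge2, hpref2, hmin2⟩ :=
              PySem.Chars.findFrom_natCast_spec stem.toList pvM2.toList 18 h18 h2
            exact hmin2 i hi (by omega)
        simp only [List.foldl_cons, List.foldl_nil, hfind1, hfind2, hscan]
        have c1 : (p1 != -1) = true := by simp [h1]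
        have hlt' : (p2 != -1 && decide (p2 < p1)) = false := by
          rcases not_and_or.mp hlt with hcontra | hnl
          · simp [not_not.mp hcontra]
          · simp [hnl]
        have := pv_tail stem p1 pvM1 '-' (by omega) pvM1_toList
        simpa [c1, hlt'] using this
  · have hsw : ¬ (PySem.Str.startswith stem pvPREFIX = true) := by
      rw [PySem.Str.startswith_eq]
      intro hc
      exact hpre ((PySem.Chars.startswith_iff _ _).mp hc)
    rw [if_neg hsw, if_neg hpre]
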